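-- pv_equiv track=rewrite | github.com/Ryzzooo/Projek-Kriptografi-AES | main.py | apply_affine
-- ===== SOURCE A (Python) =====
-- def apply_affine(byte_val, matrix, constant):
--     """Menerapkan transformasi Affine"""
--     result = 0
--     for i in range(8):
--         bit = 0
--         for j in range(8):
--             if (matrix[i] >> j) & 1:
--                 if (byte_val >> j) & 1:
--                     bit ^= 1
--         if bit:
--             result |= (1 << i)
--     return result ^ constant
-- ===== SOURCE B (Python) =====
-- def apply_affine(byte_val, matrix, constant):
--     """Menerapkan transformasi Affine"""
--     masked = byte_val & 0xFF
--     result = 0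
--     for i in range(8):
--         result += (((matrix[i] & 0xFF) & masked).bit_count() & 1) << i
--     return result ^ constant
-- ===== Notes on version B (the rewrite author's own statement) =====
-- stated objective: alternative
-- what changed: B computes each output bit as the parity of the popcount of (matrix[i] & byte_val) masked to the low byte (the standard AND-plus-popcount formulation of a GF(2) dot product), summing the weighted parity bits, instead of A's inner loop that walks the 8 bit positions and toggles a parity flag per position.
import Mathlib
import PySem

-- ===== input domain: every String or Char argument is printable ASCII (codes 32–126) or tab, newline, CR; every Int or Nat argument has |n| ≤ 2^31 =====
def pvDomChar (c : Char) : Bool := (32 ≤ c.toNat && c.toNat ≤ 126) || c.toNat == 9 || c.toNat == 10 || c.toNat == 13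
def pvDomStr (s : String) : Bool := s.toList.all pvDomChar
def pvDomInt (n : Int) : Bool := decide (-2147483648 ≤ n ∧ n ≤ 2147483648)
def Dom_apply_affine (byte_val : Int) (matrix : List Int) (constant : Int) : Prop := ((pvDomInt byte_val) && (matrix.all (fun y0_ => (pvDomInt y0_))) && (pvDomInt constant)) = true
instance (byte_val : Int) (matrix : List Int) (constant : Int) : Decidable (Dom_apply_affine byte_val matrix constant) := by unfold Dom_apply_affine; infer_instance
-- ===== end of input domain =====

-- B replaces A's nested bit loops by the AND-plus-popcount formulation: it masks the byte once,
-- ANDs it with each (masked) matrix row and takes the parity of the popcount, adding the weighted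
-- parities up (objective: alternative algorithm, same cost).

-- ===== PORT A =====
-- Python's x>>j, x&y, x|y, x^y on ints are '>>> (j:Nat)' and PySem.Int.band/bor/bxor (exact, incl.
-- negatives); matrix[i] with i : 0..7 is pyGetD, exact under Pre_ (IndexError excluded by Pre_).
def apply_affine (byte_val : Int) (matrix : List Int) (constant : Int) : Int :=
  let result : Int := (List.range 8).foldl (fun result (i : Nat) =>
    let bit : Int := (List.range 8).foldl (fun bit (j : Nat) =>
      if PySem.Int.band (PySem.List.pyGetD matrix (i : Int) 0 >>> j) 1 ≠ 0 then
        (if PySem.Int.band (byte_val >>> j) 1 ≠ 0 then PySem.Int.bxor bit 1 else bit)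
      else bit) 0
    if bit ≠ 0 then PySem.Int.bor result ((1 : Int) <<< i) else result) 0
  PySem.Int.bxor result constant

-- ===== PORT B =====
-- int.bit_count() is PySem.Int.bitCount (Python-exact); the '& 1' on it is Nat's '&&& 1'.
def apply_affine_alt (byte_val : Int) (matrix : List Int) (constant : Int) : Int :=
  let masked : Int := PySem.Int.band byte_val 255
  let result : Int := (List.range 8).foldl (fun result (i : Nat) =>
    result + (((PySem.Int.bitCount
        (PySem.Int.band (PySem.Int.band (PySem.List.pyGetD matrix (i : Int) 0) 255) masked)
        &&& 1) <<< i : Nat) : Int)) 0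
  PySem.Int.bxor result constant

-- ===== PRECONDITION & SPEC =====
-- Pre_ excludes matrices with fewer than 8 rows, on which Python A raises IndexError.
def Pre_apply_affine (byte_val : Int) (matrix : List Int) (constant : Int) : Prop :=
  8 ≤ matrix.length
instance (byte_val : Int) (matrix : List Int) (constant : Int) : Decidable (Pre_apply_affine byte_val matrix constant) := by unfold Pre_apply_affine; infer_instance

def pvWitness_apply_affine : Int × List Int × Int := (203, [1, 2, 4, 8, 16, 32, 64, 128], 99)

def Spec_apply_affine (byte_val : Int) (matrix : List Int) (constant : Int) (out : Int) : Prop := out = apply_affine_alt byte_val matrix constant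
instance (byte_val : Int) (matrix : List Int) (constant : Int) (out : Int) : Decidable (Spec_apply_affine byte_val matrix constant out) := by unfold Spec_apply_affine; infer_instance

-- ===== CLAIM (what is proved, stated in full; the proofs are below) =====
def Claim_equal_apply_affine : Prop := ∀ (byte_val : Int) (matrix : List Int) (constant : Int), Dom_apply_affine byte_val matrix constant → Pre_apply_affine byte_val matrix constant → Spec_apply_affine byte_val matrix constant (apply_affine byte_val matrix constant)

-- ===== LEMMAS AND PROOFS =====

-- the low byte of a Python int, as a Nat
def pvNf (a : Int) : Nat := (a % 256).toNat

lemma pvNf_lt (a : Int) : pvNf a < 256 := by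
  unfold pvNf
  have h1 : 0 ≤ a % 256 := Int.emod_nonneg a (by norm_num)
  have h2 : a % 256 < 256 := Int.emod_lt_of_pos a (by norm_num)
  omega

-- k &&& 255 is k % 256
lemma pv_and255 (k : Nat) : k &&& 255 = k % 256 := by
  have h := Nat.and_two_pow_sub_one_eq_mod k 8
  norm_num at h
  exact h

-- a & 0xFF is the low byte (both signs; unfolds PySem.Int.band's branches)
lemma pv_band255 (a : Int) : PySem.Int.band a 255 = ((pvNf a : Nat) : Int) := by
  unfold pvNf
  simp only [PySem.Int.band]
  split_ifs with h1 h2 h2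
  · have h255 : (255 : Int).toNat = 255 := rfl
    rw [h255, pv_and255]
    omega
  · omega
  · have h255 : (255 : Int).toNat = 255 := rfl
    rw [h255, Nat.and_comm, pv_and255]
    omega
  · omega

-- bit j of a Python int (j < 8) is bit j of its low byte
lemma pv_bit_low (a : Int) (j : Nat) (hj : j < 8) :
    PySem.Int.band (a >>> j) 1 = (((pvNf a >>> j) &&& 1 : Nat) : Int) := by
  rw [PySem.Int.band_one, PySem.Int.mod_eq_emod_of_pos (by norm_num),
      Int.shiftRight_eq_div_pow]
  have hr : ((pvNf a : Nat) : Int) = a % 256 := by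
    have h1 : 0 ≤ a % 256 := Int.emod_nonneg a (by norm_num)
    unfold pvNf
    omega
  have h256 : ((2 : Int) ^ j) * (2 * 2 ^ (7 - j)) = 256 := by
    rw [show (2 : Int) ^ j * (2 * 2 ^ (7 - j)) = 2 ^ (j + (7 - j) + 1) by ring,
        show j + (7 - j) + 1 = 8 by omega]
    norm_num
  have ha : a = a % 256 + (2 : Int) ^ j * ((2 * 2 ^ (7 - j)) * (a / 256)) := by
    have h := Int.ediv_add_emod a 256
    rw [← mul_assoc, h256]
    omega
  calc a / ((2 : Nat) ^ j : Nat) % 2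
      = (a % 256 + (2 : Int) ^ j * ((2 * 2 ^ (7 - j)) * (a / 256))) / (2 : Int) ^ j % 2 := by
        rw [← ha]
        norm_num
    _ = (a % 256 / (2 : Int) ^ j + (2 * 2 ^ (7 - j)) * (a / 256)) % 2 := by
        rw [Int.add_mul_ediv_left _ _ (by positivity)]
    _ = (a % 256 / (2 : Int) ^ j + 2 * (2 ^ (7 - j) * (a / 256))) % 2 := by ring_nf
    _ = a % 256 / (2 : Int) ^ j % 2 := Int.add_mul_emod_self_left _ _ _
    _ = (((pvNf a >>> j) &&& 1 : Nat) : Int) := by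
        rw [Nat.shiftRight_eq_div_pow, Nat.and_one_is_mod, ← hr]
        push_cast [Int.natCast_ediv, Int.natCast_emod]
        norm_num

-- A's bit test as a Nat testBit of the low byte
lemma pv_cond (a : Int) (j : Nat) (hj : j < 8) :
    (PySem.Int.band (a >>> j) 1 ≠ 0) ↔ (pvNf a).testBit j = true := by
  rw [pv_bit_low a j hj]
  have ht : (pvNf a).testBit j = decide ((pvNf a >>> j) &&& 1 = 1) := by
    simp [Nat.testBit]
  rw [ht]
  have h1 : (pvNf a >>> j) &&& 1 = (pvNf a >>> j) % 2 := Nat.and_one_is_mod _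
  constructor
  · intro h
    simp only [decide_eq_true_eq]
    omega
  · intro h
    simp only [decide_eq_true_eq] at h
    omega

-- the 8-bit parity fold of A equals bit_count parity, for every byte (kernel evaluation)
set_option maxRecDepth 40000 in
lemma pv_row_fin : ∀ p : Fin 256,
    (List.range 8).foldl (fun (bit : Int) (j : Nat) =>
      if p.val.testBit j then PySem.Int.bxor bit 1 else bit) 0
    = ((PySem.Int.bitCount (p.val : Int) &&& 1 : Nat) : Int) := by decide

-- A's inner loop over row m equals the popcount parity of (low byte of m) & (low byte of bv)
lemma pv_rowA (m bv : Int) :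
    (List.range 8).foldl (fun (bit : Int) (j : Nat) =>
      if PySem.Int.band (m >>> j) 1 ≠ 0 then
        (if PySem.Int.band (bv >>> j) 1 ≠ 0 then PySem.Int.bxor bit 1 else bit)
      else bit) 0
    = ((PySem.Int.bitCount ((pvNf m &&& pvNf bv : Nat) : Int) &&& 1 : Nat) : Int) := by
  rw [PySem.List.foldl_congr_mem (List.range 8) _
    (fun (bit : Int) (j : Nat) => if (pvNf m &&& pvNf bv).testBit j then PySem.Int.bxor bit 1 else bit) 0
    (by
      intro acc j hj
      have hj8 : j < 8 := List.mem_range.mp hj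
      show _ = if (pvNf m &&& pvNf bv).testBit j = true then PySem.Int.bxor acc 1 else acc
      rw [if_congr (pv_cond m j hj8) rfl rfl, if_congr (pv_cond bv j hj8) rfl rfl,
          Nat.testBit_and]
      cases hm' : (pvNf m).testBit j <;> cases hb' : (pvNf bv).testBit j <;> simp)]
  have hlt : pvNf m &&& pvNf bv < 256 :=
    Nat.lt_of_le_of_lt (Nat.and_le_left) (pvNf_lt m)
  exact pv_row_fin ⟨pvNf m &&& pvNf bv, hlt⟩

-- disjoint OR is addition: r ||| 2^n = r + 2^n below 2^n
lemma pv_or_two_pow : ∀ (n r : Nat), r < 2 ^ n → r ||| 2 ^ n = r + 2 ^ n := by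
  intro n
  induction n with
  | zero => intro r h; interval_cases r; decide
  | succ n ih =>
    intro r h
    have hd : Nat.bit r.bodd r.div2 = r := Nat.bit_bodd_div2 r
    have h2 : Nat.bit false (2 ^ n) = 2 ^ (n + 1) := by simp [Nat.bit_val]; ring
    have hdv : r.div2 = r / 2 := Nat.div2_val r
    have hbd : r.bodd.toNat + 2 * r.div2 = r := Nat.bodd_add_div2 r
    have hq : r.div2 < 2 ^ n := by rw [hdv]; omega
    calc r ||| 2 ^ (n + 1) = Nat.bit r.bodd r.div2 ||| Nat.bit false (2 ^ n) := by rw [hd, h2]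
      _ = Nat.bit (r.bodd || false) (r.div2 ||| 2 ^ n) := Nat.lor_bit _ _ _ _
      _ = Nat.bit r.bodd (r.div2 + 2 ^ n) := by rw [ih _ hq, Bool.or_false]
      _ = r + 2 ^ (n + 1) := by
          rw [Nat.bit_val]; cases hb : r.bodd <;> simp [hb] at hbd ⊢ <;> omega

-- OR-accumulation of one bit per position equals summing the weighted bits (Nat level)
lemma pv_foldNat (c : Nat → Nat) (hc : ∀ i, c i ≤ 1) : ∀ n : Nat,
    ((List.range n).foldl (fun r i => if c i ≠ 0 then r ||| (1 <<< i) else r) 0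
      = (List.range n).foldl (fun r i => r + (c i <<< i)) 0)
    ∧ (List.range n).foldl (fun r i => r + (c i <<< i)) 0 < 2 ^ n := by
  intro n
  induction n with
  | zero => exact ⟨rfl, by simp⟩
  | succ n ih =>
    obtain ⟨ihe, ihb⟩ := ih
    rw [List.range_succ]
    simp only [List.foldl_append, List.foldl_cons, List.foldl_nil]
    have hsh : (1 : Nat) <<< n = 2 ^ n := Nat.one_shiftLeft n
    have hcs : c n <<< n = c n * 2 ^ n := by rw [Nat.shiftLeft_eq]
    constructor
    · rw [ihe]
      by_cases h : c n = 0
      · simp [h]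
      · have hc1 : c n = 1 := by have := hc n; omega
        rw [if_pos (by omega), hsh, hcs, hc1, one_mul]
        exact pv_or_two_pow n _ ihb
    · have hle : c n * 2 ^ n ≤ 2 ^ n := by
        have := hc n
        calc c n * 2 ^ n ≤ 1 * 2 ^ n := Nat.mul_le_mul_right _ this
          _ = 2 ^ n := one_mul _
      rw [hcs]
      calc (List.range n).foldl (fun r i => r + (c i <<< i)) 0 + c n * 2 ^ n
          < 2 ^ n + 2 ^ n := by omega
        _ = 2 ^ (n + 1) := by ring

-- cast: A's Int OR-fold is the Nat OR-fold
lemma pv_castA_aux (P : Nat → Prop) [DecidablePred P] :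
    ∀ (l : List Nat) (r : Nat),
      l.foldl (fun (r : Int) i => if P i then PySem.Int.bor r ((1 : Int) <<< i) else r) (r : Int)
      = ((l.foldl (fun r i => if P i then r ||| ((1 : Nat) <<< i) else r) r : Nat) : Int) := by
  intro l
  induction l with
  | nil => intro r; rfl
  | cons x xs ih =>
    intro r
    by_cases hp : P x
    · simp only [List.foldl_cons, if_pos hp]
      rw [show (1 : Int) <<< x = (((1 : Nat) <<< x : Nat) : Int) by
            simp [Int.shiftLeft_eq, Nat.shiftLeft_eq],
          PySem.Int.bor_natCast]
      exact ih _
    · simp only [List.foldl_cons, if_neg hp]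
      exact ih _

-- cast: B's Int sum-fold is the Nat sum-fold
lemma pv_castB_aux (c : Nat → Nat) :
    ∀ (l : List Nat) (r : Nat),
      l.foldl (fun (r : Int) i => r + ((c i <<< i : Nat) : Int)) (r : Int)
      = ((l.foldl (fun r i => r + (c i <<< i)) r : Nat) : Int) := by
  intro l
  induction l with
  | nil => intro r; rfl
  | cons x xs ih =>
    intro r
    simp only [List.foldl_cons]
    rw [show (r : Int) + ((c x <<< x : Nat) : Int) = ((r + (c x <<< x) : Nat) : Int) by
          push_cast; ring]
    exact ih _

-- the two outer loops agree, given one 0/1 contribution per position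
lemma pv_or_add_int (c : Nat → Nat) (hc : ∀ i, c i ≤ 1) :
    (List.range 8).foldl (fun (r : Int) i => if ((c i : Nat) : Int) ≠ 0 then PySem.Int.bor r ((1 : Int) <<< i) else r) 0
    = (List.range 8).foldl (fun (r : Int) i => r + ((c i <<< i : Nat) : Int)) 0 := by
  rw [PySem.List.foldl_congr_mem (List.range 8) _
    (fun (r : Int) i => if c i ≠ 0 then PySem.Int.bor r ((1 : Int) <<< i) else r) 0
    (by intro acc i _; by_cases h : c i = 0 <;> simp [h])]
  rw [show (0 : Int) = ((0 : Nat) : Int) from rfl, pv_castA_aux (fun i => c i ≠ 0),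
      pv_castB_aux]
  exact congrArg _ (pv_foldNat c hc 8).1

-- ===== VERDICT (by name: the statement is the Claim_ definition above) =====
theorem apply_affine_spec : Claim_equal_apply_affine := by
  intro byte_val matrix constant _ _
  unfold Spec_apply_affine apply_affine apply_affine_alt
  simp only [pv_rowA, pv_band255, PySem.Int.band_natCast]
  rw [pv_or_add_int
    (fun i => PySem.Int.bitCount ((pvNf (PySem.List.pyGetD matrix (i : Int) 0) &&& pvNf byte_val : Nat) : Int) &&& 1)
    (fun i => by
      have h := Nat.and_one_is_mod
        (PySem.Int.bitCount ((pvNf (PySem.List.pyGetD matrix (i : Int) 0) &&& pvNf byte_val : Nat) : Int))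
      show PySem.Int.bitCount ((pvNf (PySem.List.pyGetD matrix (i : Int) 0) &&& pvNf byte_val : Nat) : Int) &&& 1 ≤ 1
      omega)]
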